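-- pv_equiv track=rewrite | github.com/NICD-Wastewater-Genomics/Measles-Genomic-Surveillance-Paper | tree/get_key_mutations.py | reversion_checking
-- ===== SOURCE A (Python) =====
-- def reversion_checking(mut_list):
--     # check if a reversion is present.
--     flipPairs = [(d, d[-1] + d[1:len(d)-1]+d[0]) for d in mut_list
--                  if (d[-1] + d[1:len(d)-1]+d[0]) in mut_list]
--     flipPairs = [list(fp) for fp in list(set(flipPairs))]
--     # subtract lower of two pair counts to get the lineage defining mutations
--     if len(flipPairs)>0:
--         for f in flipPairs:
--             p0 = mut_list.count(f[0])
--             p1 = mut_list.count(f[1])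
--             if p0==p1:
--                 mut_list = [ml for ml in mut_list if (ml !=f[0]) or (ml!= f[1])]
--             elif p1>p0:
--                 mut_list = [ml for ml in mut_list if (ml !=f[0])]
--             elif p0>p1:
--                 mut_list = [ml for ml in mut_list if (ml!= f[1])]
--         return mut_list
--
--     else:
--         return mut_list
-- ===== SOURCE B (Python) =====
-- def reversion_checking(mut_list):
--     # One counting pass + one marking pass over distinct mutations + one filter,
--     # instead of A's pair-list build and repeated rescan-and-reassign loop.
--     counts = {}
--     for m in mut_list:
--         counts[m] = counts.get(m, 0) + 1
--     remove = set()
--     for m in counts: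
--         flip = m[-1] + m[1:len(m)-1] + m[0]
--         if flip == m or (flip in counts and counts[flip] > counts[m]):
--             remove.add(m)
--     return [m for m in mut_list if m not in remove]
-- ===== Notes on version B (the rewrite author's own statement) =====
-- stated objective: faster
-- what changed: B replaces A's flip-pair list build (a linear 'in mut_list' scan per element), set-dedup and iterative three-branch refilter loop (which recounts and rebuilds the list once per pair) by one counting dict, one marking pass over the distinct mutations and a single final filter.
-- outside the precondition, e.g. on reversion_checking(['X', 'XX']): A returns ['X'], B returns ['X']
import Mathlib
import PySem

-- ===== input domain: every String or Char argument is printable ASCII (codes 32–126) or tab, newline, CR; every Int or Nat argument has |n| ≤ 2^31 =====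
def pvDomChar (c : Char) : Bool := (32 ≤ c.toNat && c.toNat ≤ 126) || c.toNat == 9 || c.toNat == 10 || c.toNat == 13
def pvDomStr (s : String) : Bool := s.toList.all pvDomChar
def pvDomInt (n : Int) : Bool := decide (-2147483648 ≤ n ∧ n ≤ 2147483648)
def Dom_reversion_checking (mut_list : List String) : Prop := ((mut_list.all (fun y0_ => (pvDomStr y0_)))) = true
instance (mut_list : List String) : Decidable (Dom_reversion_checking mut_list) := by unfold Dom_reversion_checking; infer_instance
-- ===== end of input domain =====

-- B replaces A's pair-list + repeated rescan loop with one counting pass, one marking pass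
-- over the distinct mutations and one filter (objective: simpler; equality of RETURN values).

-- ===== PORT A =====
-- the flip expression d[-1] + d[1:len(d)-1] + d[0], shared verbatim by both Pythons;
-- computed on code points (exact; on "" Python raises IndexError — excluded by Pre_).
def pvFlipL (l : List Char) : List Char :=
  (((PySem.List.pyGet? l (-1)).map (fun c => [c])).getD []) ++
    PySem.List.slice l (some 1) (some (PySem.Chars.len l - 1)) ++
    (((PySem.List.pyGet? l 0).map (fun c => [c])).getD [])

def pvFlip (d : String) : String := String.ofList (pvFlipL d.toList)

-- body of A's for-loop: recount, then the three filter branches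
def pvStep (ml : List String) (f : String × String) : List String :=
  let p0 := PySem.List.count ml f.1
  let p1 := PySem.List.count ml f.2
  if p0 = p1 then ml.filter (fun m => m != f.1 || m != f.2)
  else if p1 > p0 then ml.filter (fun m => m != f.1)
  else ml.filter (fun m => m != f.2)

def reversion_checking (mut_list : List String) : List String :=
  let flipPairs0 : List (String × String) :=
    (mut_list.filter (fun d => mut_list.contains (pvFlip d))).map (fun d => (d, pvFlip d))
  let flipPairs : List (String × String) := PySem.Set.ofList flipPairs0
  if flipPairs.length > 0 then
    flipPairs.foldl pvStep mut_list
  else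
    mut_list

-- ===== PORT B =====
def reversion_checking_alt (mut_list : List String) : List String :=
  let counts : PySem.Dict String Int :=
    mut_list.foldl (fun d m => d.insert m (d.getD m 0 + 1)) PySem.Dict.empty
  let remove : PySem.Set String :=
    counts.keys.foldl (fun s m =>
      if pvFlip m == m || (counts.contains (pvFlip m) &&
          decide (counts.getD m 0 < counts.getD (pvFlip m) 0)) then
        PySem.Set.add s m
      else s) PySem.Set.empty
  mut_list.filter (fun m => !(PySem.Set.contains remove m))

-- ===== PRECONDITION & SPEC =====
-- Pre_ excludes (1) lists containing "" — A (and B) raise IndexError on d[-1] — and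
-- (2) lists containing a one-character mutation together with its doubled string
-- (e.g. "X" and "XX"), on which A's result depends on the iteration order of
-- list(set(...)) (Python hash randomisation), so no single value can be claimed.
def Pre_reversion_checking (mut_list : List String) : Prop :=
  ∀ s ∈ mut_list, s.toList ≠ [] ∧
    (s.toList.length = 1 → String.ofList (s.toList ++ s.toList) ∉ mut_list)
instance (mut_list : List String) : Decidable (Pre_reversion_checking mut_list) := by
  unfold Pre_reversion_checking; infer_instance

def pvWitness_reversion_checking : List String := ["A5T", "T5A", "A5T", "G1C", "ABA"]

def Spec_reversion_checking (mut_list : List String) (out : List String) : Prop := out = reversion_checking_alt mut_list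
instance (mut_list : List String) (out : List String) : Decidable (Spec_reversion_checking mut_list out) := by unfold Spec_reversion_checking; infer_instance

-- ===== CLAIM (what is proved, stated in full; the proofs are below) =====
def Claim_equal_reversion_checking : Prop := ∀ (mut_list : List String), Dom_reversion_checking mut_list → Pre_reversion_checking mut_list → Spec_reversion_checking mut_list (reversion_checking mut_list)

-- ===== LEMMAS AND PROOFS =====

-- the removal condition both programs implement, stated against the ORIGINAL list's counts
def pvBad (L0 : List String) (m : String) : Bool :=
  (pvFlip m == m) || decide (L0.count m < L0.count (pvFlip m))

lemma pvFlipL_pair (c e : Char) (cs : List Char) :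
    pvFlipL (c :: cs ++ [e]) = e :: cs ++ [c] := by
  have h1 : PySem.List.pyGet? (c :: cs ++ [e]) (-1) = some e := by
    rw [PySem.List.pyGet?_neg_one, show c :: cs ++ [e] = (c :: cs) ++ [e] by simp,
      List.getLast?_concat]
  have hlen : PySem.Chars.len (c :: cs ++ [e]) - 1 = ((cs.length + 1 : Nat) : Int) := by
    simp [PySem.Chars.len]
  have h2 : PySem.List.slice (c :: cs ++ [e]) (some 1)
      (some (PySem.Chars.len (c :: cs ++ [e]) - 1)) = cs := by
    rw [hlen, show (1 : Int) = ((1 : Nat) : Int) by norm_num, PySem.List.slice_natCast]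
    simp
  unfold pvFlipL
  rw [h1, h2]
  simp [PySem.List.pyGet?_zero_cons]

lemma pvFlip_pair (c e : Char) (cs : List Char) (a : String) (ha : a.toList = c :: cs ++ [e]) :
    pvFlip a = String.ofList (e :: cs ++ [c]) := by
  unfold pvFlip; rw [ha, pvFlipL_pair]

-- under Pre_, a member whose flip is also a member has length ≥ 2
lemma pv_shape (L0 : List String) (hpre : Pre_reversion_checking L0)
    (a : String) (ha : a ∈ L0) (hfa : pvFlip a ∈ L0) :
    ∃ c cs e, a.toList = c :: cs ++ [e] := by
  obtain ⟨hne, h1⟩ := hpre a ha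
  cases hl : a.toList with
  | nil => exact absurd hl hne
  | cons c t =>
    rcases t.eq_nil_or_concat with rfl | ⟨cs, e, rfl⟩
    · exfalso
      apply h1 (by rw [hl]; rfl)
      have : pvFlip a = String.ofList (a.toList ++ a.toList) := by
        unfold pvFlip; rw [hl]; rfl
      rwa [← this]
    · exact ⟨c, cs, e, by simp⟩

lemma pv_invol (c e : Char) (cs : List Char) (a : String) (ha : a.toList = c :: cs ++ [e]) :
    pvFlip (pvFlip a) = a := by
  rw [pvFlip_pair c e cs a ha, pvFlip, String.toList_ofList, pvFlipL_pair]
  rw [← ha, String.ofList_toList]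

lemma count_filter_ite (l : List String) (p : String → Bool) (x : String) :
    (l.filter p).count x = if p x then l.count x else 0 := by
  split
  · exact List.count_filter (by assumption)
  · refine List.count_eq_zero.mpr (fun hx => ?_)
    have := (List.mem_filter.mp hx).2
    simp_all

lemma pv_hcomp (L0 : List String) (r : String → Bool) (x : String) :
    (L0.filter (fun m => !(r m))).filter (fun m => m != x)
      = L0.filter (fun m => !(r m || m == x)) := by
  rw [List.filter_filter]
  refine List.filter_congr (fun m _ => ?_)
  cases hr : r m <;> cases hmx : m == x <;> simp only [bne, hmx] <;> rfl

lemma pv_hcnt (L0 : List String) (r : String → Bool) (x : String) :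
    List.count x (L0.filter (fun m => !(r m))) = if r x then 0 else List.count x L0 := by
  rw [count_filter_ite]
  cases r x <;> simp

-- main invariant for A's fold: processing any list of valid flip pairs that still covers
-- every not-yet-removed bad mutation ends in "original minus the bad mutations"
lemma pv_foldlA (L0 : List String) (hpre : Pre_reversion_checking L0) :
    ∀ (P : List (String × String)) (r : String → Bool),
      (∀ p ∈ P, p.1 ∈ L0 ∧ p.2 = pvFlip p.1 ∧ p.2 ∈ L0) →
      (∀ m, r m = true → pvBad L0 m = true) →
      (∀ m ∈ L0, pvBad L0 m = true → r m = true ∨ (m, pvFlip m) ∈ P) →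
      P.foldl pvStep (L0.filter (fun m => !(r m))) = L0.filter (fun m => !(pvBad L0 m)) := by
  intro P
  induction P with
  | nil =>
    intro r _hvalid hsub hcover
    simp only [List.foldl_nil]
    refine List.filter_congr (fun m hm => ?_)
    congr 1
    cases hb : pvBad L0 m with
    | true =>
      rcases hcover m hm hb with h | h
      · exact h
      · simp at h
    | false =>
      cases hr : r m with
      | false => rfl
      | true => rw [hsub m hr] at hb; cases hb
  | cons ab Q ih =>
    intro r hvalid hsub hcover
    obtain ⟨a, b⟩ := ab
    obtain ⟨haL, hbf, hbL⟩ := hvalid (a, b) (List.mem_cons_self ..)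
    simp only at hbf
    subst hbf
    obtain ⟨c, cs, e, hshape⟩ := pv_shape L0 hpre a haL hbL
    have hinv : pvFlip (pvFlip a) = a := pv_invol c e cs a hshape
    have hvalid' : ∀ p ∈ Q, p.1 ∈ L0 ∧ p.2 = pvFlip p.1 ∧ p.2 ∈ L0 :=
      fun p hp => hvalid p (List.mem_cons_of_mem _ hp)
    have hcaPos : 0 < List.count a L0 := List.count_pos_iff.mpr haL
    have hcount0 : PySem.List.count (L0.filter (fun m => !(r m))) a
        = if r a then 0 else List.count a L0 := by
      rw [PySem.List.count_eq, pv_hcnt]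
    have hcount1 : PySem.List.count (L0.filter (fun m => !(r m))) (pvFlip a)
        = if r (pvFlip a) then 0 else List.count (pvFlip a) L0 := by
      rw [PySem.List.count_eq, pv_hcnt]
    simp only [List.foldl_cons]
    by_cases hab : a = pvFlip a
    · -- self-flip pair (a, a): the equal-count branch erases a entirely
      have hbad : pvBad L0 a = true := by
        unfold pvBad
        rw [beq_iff_eq.mpr hab.symm]
        simp
      have hstep : pvStep (L0.filter (fun m => !(r m))) (a, pvFlip a)
          = (L0.filter (fun m => !(r m))).filter (fun m => m != a) := by
        simp only [pvStep]
        rw [if_pos (by rw [← hab])]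
        congr 1
        funext m
        rw [← hab, Bool.or_self]
      rw [hstep, pv_hcomp]
      refine ih (fun m => r m || m == a) hvalid' ?_ ?_
      · intro m hm
        rcases Bool.or_eq_true_iff.mp hm with h | h
        · exact hsub m h
        · rw [beq_iff_eq.mp h]; exact hbad
      · intro m hm hb
        rcases hcover m hm hb with h | h
        · exact Or.inl (by simp [h])
        · rcases List.mem_cons.mp h with h | h
          · have hma : m = a := by simpa using congrArg Prod.fst h
            exact Or.inl (by simp [hma])
          · exact Or.inr h
    · -- a ≠ flip a
      have hfne : (pvFlip a == a) = false := beq_eq_false_iff_ne.mpr (Ne.symm hab)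
      have hane : (a == pvFlip a) = false := beq_eq_false_iff_ne.mpr hab
      have hbadA : pvBad L0 a = true ↔ List.count a L0 < List.count (pvFlip a) L0 := by
        unfold pvBad; rw [hfne]; simp
      have hbadB : pvBad L0 (pvFlip a) = true
          ↔ List.count (pvFlip a) L0 < List.count a L0 := by
        unfold pvBad; rw [hinv, hane]; simp
      rcases Nat.lt_trichotomy (PySem.List.count (L0.filter (fun m => !(r m))) a)
        (PySem.List.count (L0.filter (fun m => !(r m))) (pvFlip a)) with hlt | heq | hgt
      · -- current count of a is lower: the elif p1>p0 branch erases a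
        have hbada : pvBad L0 a = true := by
          rw [hcount0, hcount1] at hlt
          split_ifs at hlt with hra hrb
          · omega
          · exact hsub a hra
          · omega
          · exact hbadA.mpr hlt
        have hstep : pvStep (L0.filter (fun m => !(r m))) (a, pvFlip a)
            = L0.filter (fun m => !(r m || m == a)) := by
          simp only [pvStep]
          rw [if_neg (Nat.ne_of_lt hlt), if_pos hlt, pv_hcomp]
        rw [hstep]
        refine ih (fun m => r m || m == a) hvalid' ?_ ?_
        · intro m hm
          rcases Bool.or_eq_true_iff.mp hm with h | h
          · exact hsub m h
          · rw [beq_iff_eq.mp h]; exact hbada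
        · intro m hm hb
          rcases hcover m hm hb with h | h
          · exact Or.inl (by simp [h])
          · rcases List.mem_cons.mp h with h | h
            · have hma : m = a := by simpa using congrArg Prod.fst h
              exact Or.inl (by simp [hma])
            · exact Or.inr h
      · -- equal current counts of two distinct strings: the filter keeps everything
        have hstep : pvStep (L0.filter (fun m => !(r m))) (a, pvFlip a)
            = L0.filter (fun m => !(r m)) := by
          simp only [pvStep]
          rw [if_pos heq]
          rw [List.filter_congr (q := fun _ => true) (fun m _ => ?_), List.filter_true]
          by_cases hma : m = a
          · subst hma; simp [bne, hane]
          · simp [bne, beq_eq_false_iff_ne.mpr hma]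
        rw [hstep]
        refine ih r hvalid' hsub ?_
        intro m hm hb
        rcases hcover m hm hb with h | h
        · exact Or.inl h
        · rcases List.mem_cons.mp h with h | h
          · have hma : m = a := by simpa using congrArg Prod.fst h
            subst hma
            left
            by_contra hra
            rw [Bool.not_eq_true] at hra
            rw [hcount0, hcount1, hra, if_neg Bool.false_ne_true] at heq
            have hcc := hbadA.mp hb
            split_ifs at heq with hrb <;> omega
          · exact Or.inr h
      · -- current count of a is higher: the elif p0>p1 branch erases flip a
        have hbadb : pvBad L0 (pvFlip a) = true := by
          rw [hcount0, hcount1] at hgt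
          split_ifs at hgt with h1 h2 h3
          · omega
          · exact hsub (pvFlip a) h1
          · omega
          · exact hbadB.mpr hgt
        have hstep : pvStep (L0.filter (fun m => !(r m))) (a, pvFlip a)
            = L0.filter (fun m => !(r m || m == pvFlip a)) := by
          simp only [pvStep]
          rw [if_neg (Nat.ne_of_gt hgt), if_neg (by omega), pv_hcomp]
        rw [hstep]
        refine ih (fun m => r m || m == pvFlip a) hvalid' ?_ ?_
        · intro m hm
          rcases Bool.or_eq_true_iff.mp hm with h | h
          · exact hsub m h
          · rw [beq_iff_eq.mp h]; exact hbadb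
        · intro m hm hb
          rcases hcover m hm hb with h | h
          · exact Or.inl (by simp [h])
          · rcases List.mem_cons.mp h with h | h
            · have hma : m = a := by simpa using congrArg Prod.fst h
              left
              rw [hma] at hb ⊢
              show (r a || (a == pvFlip a)) = true
              rw [hane, Bool.or_false]
              by_contra hra
              rw [Bool.not_eq_true] at hra
              rw [hcount0, hcount1, hra, if_neg Bool.false_ne_true] at hgt
              have hcc := hbadA.mp hb
              split_ifs at hgt with hrb
              · have := hbadB.mp (hsub (pvFlip a) hrb)
                omega
              · omega
            · exact Or.inr h

lemma pv_A_eq (L0 : List String) (hpre : Pre_reversion_checking L0) :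
    reversion_checking L0 = L0.filter (fun m => !(pvBad L0 m)) := by
  simp only [reversion_checking]
  have hvalid : ∀ p ∈ PySem.Set.ofList
      ((L0.filter (fun d => L0.contains (pvFlip d))).map (fun d => (d, pvFlip d))),
      p.1 ∈ L0 ∧ p.2 = pvFlip p.1 ∧ p.2 ∈ L0 := by
    intro p hp
    rw [PySem.Set.mem_ofList] at hp
    obtain ⟨d, hd, rfl⟩ := List.mem_map.mp hp
    obtain ⟨hdL, hdc⟩ := List.mem_filter.mp hd
    exact ⟨hdL, rfl, List.contains_iff_mem.mp hdc⟩
  have hcov : ∀ m ∈ L0, pvBad L0 m = true → (m, pvFlip m) ∈ PySem.Set.ofList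
      ((L0.filter (fun d => L0.contains (pvFlip d))).map (fun d => (d, pvFlip d))) := by
    intro m hm hb
    have hfm : pvFlip m ∈ L0 := by
      unfold pvBad at hb
      rcases Bool.or_eq_true_iff.mp hb with h | h
      · rw [beq_iff_eq.mp h]; exact hm
      · have : 0 < List.count (pvFlip m) L0 := by
          have := decide_eq_true_eq.mp h
          omega
        exact List.count_pos_iff.mp this
    rw [PySem.Set.mem_ofList]
    exact List.mem_map.mpr ⟨m,
      List.mem_filter.mpr ⟨hm, List.contains_iff_mem.mpr hfm⟩, rfl⟩
  split
  · -- some flip pair exists: run the loop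
    have h0 : L0.filter (fun m => !((fun _ : String => false) m)) = L0 := by simp
    have := pv_foldlA L0 hpre
      (PySem.Set.ofList ((L0.filter (fun d => L0.contains (pvFlip d))).map (fun d => (d, pvFlip d))))
      (fun _ => false) hvalid (by simp) (fun m hm hb => Or.inr (hcov m hm hb))
    rw [h0] at this
    exact this
  · -- no flip pair: nothing is bad, the list is returned unchanged
    next hlen =>
    have hnil : PySem.Set.ofList
        ((L0.filter (fun d => L0.contains (pvFlip d))).map (fun d => (d, pvFlip d))) = [] := by
      rw [Nat.not_lt_eq] at hlen
      exact List.length_eq_zero_iff.mp (Nat.le_zero.mp hlen)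
    refine (List.filter_eq_self.mpr (fun m hm => ?_)).symm
    cases hb : pvBad L0 m with
    | false => rfl
    | true =>
      have := hcov m hm hb
      rw [hnil] at this
      simp at this

lemma pv_B_eq (L0 : List String) :
    reversion_checking_alt L0 = L0.filter (fun m => !(pvBad L0 m)) := by
  simp only [reversion_checking_alt]
  rw [PySem.Dict.foldl_insert_getD_add_one_eq_counter,
    PySem.List.foldl_if_eq_foldl_filter
      (fun m => pvFlip m == m || ((PySem.Dict.counter L0).contains (pvFlip m) &&
        decide ((PySem.Dict.counter L0).getD m 0 < (PySem.Dict.counter L0).getD (pvFlip m) 0)))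
      PySem.Set.add, show (PySem.Set.empty : PySem.Set String) = [] from rfl,
    ← PySem.Set.ofList_eq_foldl]
  refine List.filter_congr (fun m hm => ?_)
  have hmem : m ∈ PySem.Set.ofList (List.filter (fun m => pvFlip m == m ||
      ((PySem.Dict.counter L0).contains (pvFlip m) &&
        decide ((PySem.Dict.counter L0).getD m 0 < (PySem.Dict.counter L0).getD (pvFlip m) 0)))
      (PySem.Dict.counter L0).keys) ↔ pvBad L0 m = true := by
    rw [PySem.Set.mem_ofList, List.mem_filter]
    constructor
    · rintro ⟨-, hc⟩
      simp only [Bool.or_eq_true, Bool.and_eq_true, decide_eq_true_eq,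
        PySem.Dict.getD_counter, PySem.Dict.contains_counter] at hc
      unfold pvBad
      rcases hc with h | ⟨-, h⟩
      · simp [h]
      · simp only [Bool.or_eq_true, decide_eq_true_eq]
        right; exact_mod_cast h
    · intro hb
      refine ⟨?_, ?_⟩
      · rw [PySem.Dict.keys_counter, PySem.Set.mem_ofList]; exact hm
      · unfold pvBad at hb
        simp only [Bool.or_eq_true, decide_eq_true_eq] at hb
        simp only [Bool.or_eq_true, Bool.and_eq_true, decide_eq_true_eq,
          PySem.Dict.getD_counter, PySem.Dict.contains_counter]
        rcases hb with h | h
        · left; exact h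
        · right
          refine ⟨?_, by exact_mod_cast h⟩
          have hpos : 0 < L0.count (pvFlip m) := by
            have := List.count_pos_iff.mpr hm
            omega
          simpa [List.contains_iff_mem] using List.count_pos_iff.mp hpos
  congr 1
  rw [Bool.eq_iff_iff, PySem.Set.contains_iff]
  exact hmem

-- ===== VERDICT (by name: the statement is the Claim_ definition above) =====
theorem reversion_checking_spec : Claim_equal_reversion_checking := by
  intro L0 _hdom hpre
  unfold Spec_reversion_checking
  rw [pv_A_eq L0 hpre, pv_B_eq L0]
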